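-- pv_equiv track=rewrite | github.com/ListeningRift/TuneFlow | scripts/eval/eval_infilling.py | _validate_token_order
-- ===== SOURCE A (Python) =====
-- def _validate_token_order(tokens: list[str], vocab: dict[str, int]) -> bool:
--     """
--     校验 token 序列结构是否合法。
--
--     语法约束与 tokenizer 训练数据保持一致：
--     - BOS ... EOS
--     - BAR 分段
--     - 音符事件按 `POS -> INST -> PITCH -> DUR -> VEL` 5 元组出现
--     """
--     if any(token not in vocab for token in tokens):
--         return False
--     if not tokens or tokens[0] != "BOS" or tokens[-1] != "EOS":
--         return False
--
--     idx = 1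
--     if idx < len(tokens) - 1 and tokens[idx].startswith("TEMPO_"):
--         idx += 1
--
--     while idx < len(tokens) - 1:
--         if tokens[idx] != "BAR":
--             return False
--         idx += 1
--         if idx < len(tokens) - 1 and tokens[idx].startswith("TEMPO_"):
--             idx += 1
--         while idx < len(tokens) - 1 and tokens[idx].startswith("POS_"):
--             if idx + 4 >= len(tokens):
--                 return False
--             if not tokens[idx + 1].startswith("INST_"):
--                 return False
--             if not tokens[idx + 2].startswith("PITCH_"):
--                 return False
--             if not tokens[idx + 3].startswith("DUR_"):
--                 return False
--             if not tokens[idx + 4].startswith("VEL_"):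
--                 return False
--             idx += 5
--         if idx < len(tokens) - 1 and tokens[idx] != "BAR":
--             return False
--     return True
-- ===== SOURCE B (Python) =====
-- # B: single left-to-right DFA pass over the interior slice tokens[1:-1],
-- # instead of A's nested index-threaded while loops.
--
-- def _step(state, tok):
--     if state == 0:  # just after BOS: optional leading TEMPO, else a BAR
--         if tok.startswith("TEMPO_"):
--             return 1
--         return 2 if tok == "BAR" else None
--     if state == 1:  # after leading TEMPO: only a BAR may follow
--         return 2 if tok == "BAR" else None
--     if state == 2:  # just after a BAR: optional TEMPO, a note, or another BAR
--         if tok.startswith("TEMPO_"):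
--             return 3
--         if tok.startswith("POS_"):
--             return 4
--         return 2 if tok == "BAR" else None
--     if state == 3:  # inside a bar body: a note or another BAR
--         if tok.startswith("POS_"):
--             return 4
--         return 2 if tok == "BAR" else None
--     if state == 4:
--         return 5 if tok.startswith("INST_") else None
--     if state == 5:
--         return 6 if tok.startswith("PITCH_") else None
--     if state == 6:
--         return 7 if tok.startswith("DUR_") else None
--     # state == 7
--     return 3 if tok.startswith("VEL_") else None
--
--
-- def _validate_token_order(tokens: list[str], vocab: dict[str, int]) -> bool:
--     if any(token not in vocab for token in tokens):
--         return False
--     if len(tokens) < 2 or tokens[0] != "BOS" or tokens[-1] != "EOS":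
--         return False
--     state = 0
--     for tok in tokens[1:-1]:
--         state = _step(state, tok)
--         if state is None:
--             return False
--     return state <= 3
-- ===== Notes on version B (the rewrite author's own statement) =====
-- stated objective: alternative
-- what changed: Replaced A's nested index-threaded while loops (with lookahead arithmetic and an overrun guard) by a single left-to-right 8-state DFA pass over the interior slice tokens[1:-1].
import Mathlib
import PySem

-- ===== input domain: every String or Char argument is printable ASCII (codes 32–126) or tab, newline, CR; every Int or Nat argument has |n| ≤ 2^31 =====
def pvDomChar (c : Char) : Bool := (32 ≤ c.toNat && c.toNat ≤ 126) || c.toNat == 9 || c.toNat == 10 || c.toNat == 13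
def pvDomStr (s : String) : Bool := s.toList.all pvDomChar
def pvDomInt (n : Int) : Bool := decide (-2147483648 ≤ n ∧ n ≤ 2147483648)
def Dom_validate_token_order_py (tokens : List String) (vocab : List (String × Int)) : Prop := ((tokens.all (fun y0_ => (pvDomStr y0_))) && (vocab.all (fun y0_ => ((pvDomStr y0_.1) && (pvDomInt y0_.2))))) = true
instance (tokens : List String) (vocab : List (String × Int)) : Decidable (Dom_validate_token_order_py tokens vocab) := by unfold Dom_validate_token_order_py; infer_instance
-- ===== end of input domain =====

-- B replaces A's nested index-threaded while loops by a single DFA pass over tokens[1:-1]; same cost, plainer control flow.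

-- ===== PORT A =====
-- inner "while idx < len-1 and tokens[idx].startswith('POS_')" loop of A:
-- returns none for A's 'return False', some idx for a normal exit
def aInner (tokens : List String) (idx : Nat) : Option Nat :=
  if h : idx < tokens.length - 1 ∧ PySem.Str.startswith (tokens.getD idx "") "POS_" = true then
    if tokens.length ≤ idx + 4 then none
    else if PySem.Str.startswith (tokens.getD (idx + 1) "") "INST_" = false then none
    else if PySem.Str.startswith (tokens.getD (idx + 2) "") "PITCH_" = false then none
    else if PySem.Str.startswith (tokens.getD (idx + 3) "") "DUR_" = false then none
    else if PySem.Str.startswith (tokens.getD (idx + 4) "") "VEL_" = false then none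
    else aInner tokens (idx + 5)
  else some idx
termination_by tokens.length - idx
decreasing_by omega

-- termination helper for the outer loop (the port cites it in decreasing_by)
theorem aInner_ge_fuel (tokens : List String) : ∀ (k idx j : Nat), tokens.length - idx ≤ k → aInner tokens idx = some j → idx ≤ j := by
  intro k
  induction k with
  | zero =>
    intro idx j hk h
    rw [aInner, dif_neg (fun hc => absurd hc.1 (by omega))] at h
    exact Nat.le_of_eq (Option.some.injEq _ _ ▸ h)
  | succ k ih =>
    intro idx j hk h
    rw [aInner] at h
    split at h
    · split at h
      · exact absurd h (by simp)
      · split at h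
        · exact absurd h (by simp)
        · split at h
          · exact absurd h (by simp)
          · split at h
            · exact absurd h (by simp)
            · split at h
              · exact absurd h (by simp)
              · exact Nat.le_trans (by omega) (ih (idx + 5) j (by omega) h)
    · exact Nat.le_of_eq (Option.some.injEq _ _ ▸ h)

theorem aInner_ge (tokens : List String) (idx j : Nat) (h : aInner tokens idx = some j) : idx ≤ j :=
  aInner_ge_fuel tokens (tokens.length - idx) idx j (Nat.le_refl _) h

-- outer "while idx < len-1" loop of A
def aLoop (tokens : List String) (idx : Nat) : Bool :=
  if hlt : idx < tokens.length - 1 then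
    if tokens.getD idx "" ≠ "BAR" then false
    else
      match hm : aInner tokens (if idx + 1 < tokens.length - 1 ∧ PySem.Str.startswith (tokens.getD (idx + 1) "") "TEMPO_" = true then idx + 2 else idx + 1) with
      | none => false
      | some j =>
        if j < tokens.length - 1 ∧ tokens.getD j "" ≠ "BAR" then false
        else aLoop tokens j
  else true
termination_by tokens.length - idx
decreasing_by
  have hge := aInner_ge _ _ _ hm
  split at hge <;> omega

def validate_token_order_py (tokens : List String) (vocab : List (String × Int)) : Bool :=
  if tokens.any (fun token => !(vocab.any (fun kv => kv.1 == token))) then false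
  else if tokens.isEmpty || (tokens.getD 0 "" != "BOS") || (PySem.List.pyGetD tokens (-1) "" != "EOS") then false
  else
    aLoop tokens (if 1 < tokens.length - 1 ∧ PySem.Str.startswith (tokens.getD 1 "") "TEMPO_" = true then 2 else 1)

-- ===== PORT B =====
def bStep (s : Nat) (t : String) : Option Nat :=
  if s = 0 then
    if PySem.Str.startswith t "TEMPO_" then some 1
    else if t = "BAR" then some 2 else none
  else if s = 1 then
    if t = "BAR" then some 2 else none
  else if s = 2 then
    if PySem.Str.startswith t "TEMPO_" then some 3
    else if PySem.Str.startswith t "POS_" then some 4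
    else if t = "BAR" then some 2 else none
  else if s = 3 then
    if PySem.Str.startswith t "POS_" then some 4
    else if t = "BAR" then some 2 else none
  else if s = 4 then
    if PySem.Str.startswith t "INST_" then some 5 else none
  else if s = 5 then
    if PySem.Str.startswith t "PITCH_" then some 6 else none
  else if s = 6 then
    if PySem.Str.startswith t "DUR_" then some 7 else none
  else
    if PySem.Str.startswith t "VEL_" then some 3 else none

def bRun (s : Nat) (l : List String) : Bool :=
  match l with
  | [] => decide (s ≤ 3)
  | t :: r =>
    match bStep s t with
    | none => false
    | some s' => bRun s' r

def validate_token_order_py_alt (tokens : List String) (vocab : List (String × Int)) : Bool :=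
  if tokens.any (fun token => !(vocab.any (fun kv => kv.1 == token))) then false
  else if tokens.length < 2 || (tokens.getD 0 "" != "BOS") || (PySem.List.pyGetD tokens (-1) "" != "EOS") then false
  else bRun 0 (PySem.List.slice tokens (some 1) (some (-1)))

-- ===== PRECONDITION & SPEC =====
def Spec_validate_token_order_py (tokens : List String) (vocab : List (String × Int)) (out : Bool) : Prop := out = validate_token_order_py_alt tokens vocab
instance (tokens : List String) (vocab : List (String × Int)) (out : Bool) : Decidable (Spec_validate_token_order_py tokens vocab out) := by unfold Spec_validate_token_order_py; infer_instance

-- ===== CLAIM (what is proved, stated in full; the proofs are below) =====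
def Claim_equal_validate_token_order_py : Prop := ∀ (tokens : List String) (vocab : List (String × Int)), Dom_validate_token_order_py tokens vocab → Spec_validate_token_order_py tokens vocab (validate_token_order_py tokens vocab)

-- ===== LEMMAS AND PROOFS =====

-- proof-only helpers: the interior suffix tokens[idx : len-1]
def remAt (tokens : List String) (idx : Nat) : List String := (tokens.take (tokens.length - 1)).drop idx

-- A's code from the head of the inner note loop at idx (inner loop, then the BAR re-check, then back to the outer loop)
def postA (tokens : List String) (idx : Nat) : Bool :=
  (aInner tokens idx).elim false
    (fun j => if j < tokens.length - 1 ∧ tokens.getD j "" ≠ "BAR" then false else aLoop tokens j)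

-- A's code right after consuming a BAR at idx-1: optional TEMPO skip, then the inner loop
def barA (tokens : List String) (idx : Nat) : Bool :=
  postA tokens (if idx < tokens.length - 1 ∧ PySem.Str.startswith (tokens.getD idx "") "TEMPO_" = true then idx + 1 else idx)

theorem remAt_nil (tokens : List String) (idx : Nat) (h : tokens.length - 1 ≤ idx) : remAt tokens idx = [] := by
  apply List.drop_eq_nil_of_le
  simp only [List.length_take]
  omega

theorem remAt_cons (tokens : List String) (idx : Nat) (h : idx < tokens.length - 1) :
    remAt tokens idx = tokens.getD idx "" :: remAt tokens (idx + 1) := by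
  unfold remAt
  have hlen : idx < (tokens.take (tokens.length - 1)).length := by
    simp only [List.length_take]; omega
  rw [List.drop_eq_getElem_cons hlen]
  congr 1
  rw [List.getElem_take]
  rw [List.getD_eq_getElem tokens "" (by omega)]

theorem remAt_length (tokens : List String) (idx : Nat) : (remAt tokens idx).length = tokens.length - 1 - idx := by
  simp [remAt]

theorem aLoop_eq (tokens : List String) (idx : Nat) :
    aLoop tokens idx =
      if idx < tokens.length - 1 then
        if tokens.getD idx "" ≠ "BAR" then false else barA tokens (idx + 1)
      else true := by
  rw [aLoop]
  split
  · split
    · rfl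
    · unfold barA postA
      split
      · rename_i hm; rw [hm]; rfl
      · rename_i j hm; rw [hm]; rfl
  · rfl

theorem bRun_dead (l : List String) (s : Nat) (h4 : 4 ≤ s) (hl : l.length + s ≤ 7) : bRun s l = false := by
  induction l generalizing s with
  | nil => simp [bRun]; omega
  | cons t r ih =>
    have hs : s = 4 ∨ s = 5 ∨ s = 6 := by simp only [List.length_cons] at hl; omega
    simp only [List.length_cons] at hl
    simp only [bRun]
    split
    · rfl
    · rename_i s' heq
      have hs' : s' = s + 1 := by
        rcases hs with h | h | h <;> subst h <;> simp [bStep] at heq <;> omega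
      subst hs'
      exact ih (s + 1) (by omega) (by omega)

theorem key (tokens : List String) (hE : tokens.getD (tokens.length - 1) "" = "EOS") :
    ∀ k idx, tokens.length - idx ≤ k →
      (postA tokens idx = bRun 3 (remAt tokens idx)) ∧
      (barA tokens idx = bRun 2 (remAt tokens idx)) ∧
      (aLoop tokens idx = bRun 1 (remAt tokens idx)) := by
  intro k
  induction k using Nat.strong_induction_on with
  | _ k IH =>
  intro idx hk
  have hN : postA tokens idx = bRun 3 (remAt tokens idx) := by
    unfold postA
    by_cases hc : idx < tokens.length - 1 ∧ PySem.Str.startswith (tokens.getD idx "") "POS_" = true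
    · -- a POS_ token heads the inner loop
      have hc2 := hc.2
      simp at hc2
      rw [remAt_cons tokens idx hc.1]
      rw [show bRun 3 (tokens.getD idx "" :: remAt tokens (idx + 1)) = bRun 4 (remAt tokens (idx + 1)) from by
        simp [bRun, bStep, hc2]]
      rw [aInner, dif_pos hc]
      by_cases hover : tokens.length ≤ idx + 4
      · rw [if_pos hover]
        rw [bRun_dead _ 4 (by omega) (by rw [remAt_length]; omega)]
        rfl
      · rw [if_neg hover]
        have h1 : idx + 1 < tokens.length - 1 := by omega
        rw [remAt_cons tokens (idx + 1) h1, show idx + 1 + 1 = idx + 2 from by omega]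
        cases hI : PySem.Str.startswith (tokens.getD (idx + 1) "") "INST_" with
        | false =>
          rw [if_pos rfl]
          have hI' := hI; simp at hI'
          simp [bRun, bStep, hI']
        | true =>
          rw [if_neg (by decide)]
          have hI' := hI; simp at hI'
          rw [show bRun 4 (tokens.getD (idx + 1) "" :: remAt tokens (idx + 2)) = bRun 5 (remAt tokens (idx + 2)) from by
            simp [bRun, bStep, hI']]
          have h2 : idx + 2 < tokens.length - 1 := by omega
          rw [remAt_cons tokens (idx + 2) h2, show idx + 2 + 1 = idx + 3 from by omega]
          cases hP : PySem.Str.startswith (tokens.getD (idx + 2) "") "PITCH_" with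
          | false =>
            rw [if_pos rfl]
            have hP' := hP; simp at hP'
            simp [bRun, bStep, hP']
          | true =>
            rw [if_neg (by decide)]
            have hP' := hP; simp at hP'
            rw [show bRun 5 (tokens.getD (idx + 2) "" :: remAt tokens (idx + 3)) = bRun 6 (remAt tokens (idx + 3)) from by
              simp [bRun, bStep, hP']]
            have h3 : idx + 3 < tokens.length - 1 := by omega
            rw [remAt_cons tokens (idx + 3) h3, show idx + 3 + 1 = idx + 4 from by omega]
            cases hD : PySem.Str.startswith (tokens.getD (idx + 3) "") "DUR_" with
            | false =>
              rw [if_pos rfl]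
              have hD' := hD; simp at hD'
              simp [bRun, bStep, hD']
            | true =>
              rw [if_neg (by decide)]
              have hD' := hD; simp at hD'
              rw [show bRun 6 (tokens.getD (idx + 3) "" :: remAt tokens (idx + 4)) = bRun 7 (remAt tokens (idx + 4)) from by
                simp [bRun, bStep, hD']]
              by_cases hlast : idx + 4 = tokens.length - 1
              · -- the VEL position is the final EOS: A fails the VEL check, B ends mid-note
                have hV : PySem.Str.startswith (tokens.getD (idx + 4) "") "VEL_" = false := by
                  rw [hlast, hE]; decide
                rw [if_pos hV]
                rw [remAt_nil tokens (idx + 4) (by omega)]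
                rfl
              · have h4 : idx + 4 < tokens.length - 1 := by omega
                rw [remAt_cons tokens (idx + 4) h4, show idx + 4 + 1 = idx + 5 from by omega]
                cases hV : PySem.Str.startswith (tokens.getD (idx + 4) "") "VEL_" with
                | false =>
                  rw [if_pos rfl]
                  have hV' := hV; simp at hV'
                  simp [bRun, bStep, hV']
                | true =>
                  rw [if_neg (by decide)]
                  have hV' := hV; simp at hV'
                  rw [show bRun 7 (tokens.getD (idx + 4) "" :: remAt tokens (idx + 5)) = bRun 3 (remAt tokens (idx + 5)) from by
                    simp [bRun, bStep, hV']]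
                  have hIH := (IH (k - 1) (by omega) (idx + 5) (by omega)).1
                  unfold postA at hIH
                  exact hIH
    · -- inner loop exits immediately
      rw [show aInner tokens idx = some idx from by rw [aInner]; exact dif_neg hc]
      simp only [Option.elim]
      by_cases hlt : idx < tokens.length - 1
      · have hpos : PySem.Str.startswith (tokens.getD idx "") "POS_" = false := by
          cases h : PySem.Str.startswith (tokens.getD idx "") "POS_"
          · rfl
          · exact absurd ⟨hlt, h⟩ hc
        have hpos' := hpos; simp at hpos'
        rw [remAt_cons tokens idx hlt]
        by_cases hb : tokens.getD idx "" = "BAR"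
        · have hb' : tokens[idx]?.getD "" = "BAR" := by simpa using hb
          rw [if_neg (fun h => h.2 hb)]
          rw [aLoop_eq, if_pos hlt, if_neg (by rw [hb]; decide)]
          have hIH := (IH (k - 1) (by omega) (idx + 1) (by omega)).2.1
          rw [hIH]
          simp [bRun, bStep, hb']
          try rfl
        · have hb' : ¬ tokens[idx]?.getD "" = "BAR" := by simpa using hb
          rw [if_pos ⟨hlt, hb⟩]
          simp [bRun, bStep, hpos', hb']
      · rw [remAt_nil tokens idx (by omega)]
        rw [if_neg (fun h => hlt h.1)]
        rw [aLoop_eq, if_neg hlt]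
        rfl
  have hB : barA tokens idx = bRun 2 (remAt tokens idx) := by
    unfold barA
    by_cases ht : idx < tokens.length - 1 ∧ PySem.Str.startswith (tokens.getD idx "") "TEMPO_" = true
    · have ht2 := ht.2
      simp at ht2
      rw [if_pos ht]
      rw [remAt_cons tokens idx ht.1]
      have hIH := (IH (k - 1) (by omega) (idx + 1) (by omega)).1
      rw [hIH]
      simp [bRun, bStep, ht2]
    · rw [if_neg ht]
      rw [hN]
      by_cases hlt : idx < tokens.length - 1
      · have htf : PySem.Str.startswith (tokens.getD idx "") "TEMPO_" = false := by
          cases h : PySem.Str.startswith (tokens.getD idx "") "TEMPO_"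
          · rfl
          · exact absurd ⟨hlt, h⟩ ht
        have htf' := htf; simp at htf'
        rw [remAt_cons tokens idx hlt]
        simp [bRun, bStep, htf']
      · rw [remAt_nil tokens idx (by omega)]
        rfl
  have hH : aLoop tokens idx = bRun 1 (remAt tokens idx) := by
    rw [aLoop_eq]
    by_cases hlt : idx < tokens.length - 1
    · rw [if_pos hlt, remAt_cons tokens idx hlt]
      by_cases hb : tokens.getD idx "" = "BAR"
      · have hb' : tokens[idx]?.getD "" = "BAR" := by simpa using hb
        rw [if_neg (by rw [hb]; decide)]
        have hIH := (IH (k - 1) (by omega) (idx + 1) (by omega)).2.1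
        rw [hIH]
        simp [bRun, bStep, hb']
        try rfl
      · have hb' : ¬ tokens[idx]?.getD "" = "BAR" := by simpa using hb
        rw [if_pos hb]
        simp [bRun, bStep, hb']
    · rw [if_neg hlt, remAt_nil tokens idx (by omega)]
      rfl
  exact ⟨hN, hB, hH⟩

theorem slice_one_neg_one (xs : List String) :
    PySem.List.slice xs (some 1) (some (-1)) = (xs.take (xs.length - 1)).drop 1 := by
  rcases xs with _ | ⟨a, l⟩
  · rfl
  · simp [PySem.List.slice, PySem.List.clampIdx, List.drop_take]
    split <;> omega

theorem validate_token_order_py_spec : Claim_equal_validate_token_order_py := by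
  unfold Claim_equal_validate_token_order_py Spec_validate_token_order_py
  intro tokens vocab _
  unfold validate_token_order_py validate_token_order_py_alt
  by_cases hv : tokens.any (fun token => !(vocab.any (fun kv => kv.1 == token))) = true
  · rw [if_pos hv, if_pos hv]
  · rw [if_neg hv, if_neg hv]
    rcases tokens with _ | ⟨t0, rest⟩
    · rfl
    · rcases rest with _ | ⟨t1, rest'⟩
      · -- a single token can never be both BOS and EOS: both sides return false
        by_cases hB : t0 = "BOS"
        · subst hB
          rfl
        · simp [hB]
      · -- length ≥ 2
        have hne : (t0 :: t1 :: rest') ≠ ([] : List String) := by simp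
        have hlast : PySem.List.pyGetD (t0 :: t1 :: rest') (-1) "" = (t0 :: t1 :: rest').getD ((t0 :: t1 :: rest').length - 1) "" := by
          rw [PySem.List.pyGetD_neg_one _ _ hne, List.getLast_eq_getElem, List.getD_eq_getElem _ _ (by simp)]
          rfl
        by_cases hg : ((t0 :: t1 :: rest').getD 0 "" != "BOS") || (PySem.List.pyGetD (t0 :: t1 :: rest') (-1) "" != "EOS") = true
        · -- some boundary check fails: both sides false
          rw [show ((t0 :: t1 :: rest').isEmpty || ((t0 :: t1 :: rest').getD 0 "" != "BOS") || (PySem.List.pyGetD (t0 :: t1 :: rest') (-1) "" != "EOS")) = true from by simpa using hg]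
          rw [show ((decide ((t0 :: t1 :: rest').length < 2)) || ((t0 :: t1 :: rest').getD 0 "" != "BOS") || (PySem.List.pyGetD (t0 :: t1 :: rest') (-1) "" != "EOS")) = true from by simpa using hg]
          rfl
        · have hg' : ¬ ((t0 :: t1 :: rest').isEmpty || ((t0 :: t1 :: rest').getD 0 "" != "BOS") || (PySem.List.pyGetD (t0 :: t1 :: rest') (-1) "" != "EOS")) = true := by
            simpa using hg
          have hg'' : ¬ ((decide ((t0 :: t1 :: rest').length < 2)) || ((t0 :: t1 :: rest').getD 0 "" != "BOS") || (PySem.List.pyGetD (t0 :: t1 :: rest') (-1) "" != "EOS")) = true := by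
            simpa using hg
          rw [if_neg hg', if_neg hg'']
          have hEOS : (t0 :: t1 :: rest').getD ((t0 :: t1 :: rest').length - 1) "" = "EOS" := by
            rw [← hlast]
            simp only [Bool.or_eq_true, not_or, bne_iff_ne, ne_eq, not_not] at hg
            simpa using hg.2
          rw [slice_one_neg_one]
          have hkey := key (t0 :: t1 :: rest') hEOS (t0 :: t1 :: rest').length
          -- tempo skip at index 1
          by_cases hT : 1 < (t0 :: t1 :: rest').length - 1 ∧ PySem.Str.startswith ((t0 :: t1 :: rest').getD 1 "") "TEMPO_" = true
          · rw [if_pos hT]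
            rw [(hkey 2 (by omega)).2.2]
            rw [show (((t0 :: t1 :: rest').take ((t0 :: t1 :: rest').length - 1)).drop 1) = remAt (t0 :: t1 :: rest') 1 from rfl]
            rw [remAt_cons _ 1 hT.1]
            have ht2 := hT.2
            simp at ht2
            simp [bRun, bStep, ht2]
          · rw [if_neg hT]
            rw [show (((t0 :: t1 :: rest').take ((t0 :: t1 :: rest').length - 1)).drop 1) = remAt (t0 :: t1 :: rest') 1 from rfl]
            by_cases hlt : 1 < (t0 :: t1 :: rest').length - 1
            · have htf : PySem.Str.startswith ((t0 :: t1 :: rest').getD 1 "") "TEMPO_" = false := by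
                cases h : PySem.Str.startswith ((t0 :: t1 :: rest').getD 1 "") "TEMPO_"
                · rfl
                · exact absurd ⟨hlt, h⟩ hT
              have htf' := htf; simp at htf'
              rw [remAt_cons _ 1 hlt]
              by_cases hb : (t0 :: t1 :: rest').getD 1 "" = "BAR"
              · have hb' : t1 = "BAR" := by simpa using hb
                rw [aLoop_eq, if_pos hlt, if_neg (by rw [hb]; decide)]
                rw [(hkey 2 (by omega)).2.1]
                simp [bRun, bStep, hb']
                try rfl
              · have hb' : ¬ t1 = "BAR" := by simpa using hb
                rw [aLoop_eq, if_pos hlt, if_pos (by simpa using hb)]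
                simp [bRun, bStep, htf', hb']
            · rw [aLoop_eq, if_neg hlt, remAt_nil _ 1 (by omega)]
              rfl
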